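-- pv_equiv track=rewrite | github.com/jms7446/hackerrank | baekjoon/sliver/p5534.py | is_possible_board
-- ===== SOURCE A (Python) =====
-- def str_findall(c, s):
--     idx = s.find(c)
--     while idx != -1:
--         yield idx
--         idx = s.find(c, idx + 1)
--
-- def iter_pair_in_order(xs, ys):
--     for x in xs:
--         for y in ys:
--             if x < y:
--                 yield x, y
--
-- def is_possible_board(name, board):
--     c1_indices = list(str_findall(name[0], board))
--     c2_indices = list(str_findall(name[1], board))
--     for (c1, c2) in iter_pair_in_order(c1_indices, c2_indices):
--         gap = c2 - c1
--         if board[c1::gap].startswith(name):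
--             return True
--     return False
-- ===== SOURCE B (Python) =====
-- def is_possible_board(name, board):
--     # Group positions by stride: name matches some arithmetic progression iff
--     # name occurs as a contiguous substring of one of the decimated strings
--     # board[r::gap] (stride gap, residue r).
--     for gap in range(1, len(board)):
--         for r in range(gap):
--             if name in board[r::gap]:
--                 return True
--     return False
-- ===== Notes on version B (the rewrite author's own statement) =====
-- stated objective: alternative
-- what changed: B reformulates the problem as substring search: instead of pairing occurrence positions of the first two letters and testing each implied stride with startswith, it iterates over stride/residue classes and asks whether name is a contiguous substring ('in') of each decimated string board[r::gap]; A's find-index tables, pair generator and startswith tests disappear. Pre_ excludes names shorter than 2 characters, on which A raises IndexError.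
import Mathlib
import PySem

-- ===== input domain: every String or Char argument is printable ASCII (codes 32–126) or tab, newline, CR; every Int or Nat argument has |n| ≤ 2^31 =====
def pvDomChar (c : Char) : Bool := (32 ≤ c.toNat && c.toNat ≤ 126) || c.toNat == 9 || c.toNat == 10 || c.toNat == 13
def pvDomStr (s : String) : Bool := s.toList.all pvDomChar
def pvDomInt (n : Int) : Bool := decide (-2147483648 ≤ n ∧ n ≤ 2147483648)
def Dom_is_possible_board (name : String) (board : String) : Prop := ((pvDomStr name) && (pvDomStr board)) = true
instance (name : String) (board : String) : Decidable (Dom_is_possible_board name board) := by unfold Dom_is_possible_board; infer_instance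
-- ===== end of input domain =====

-- B replaces A's pairing of occurrence indices of name[0]/name[1] by substring search
-- over the stride/residue decimations board[r::gap]; alternative algorithm, similar cost.

-- ===== PORT A =====
-- str_findall generator: the find/find-from loop collected into a list; fuel s.length + 1
-- bounds the iteration count (each found index is strictly larger than the previous one).
def strFindallGo (c : List Char) (s : List Char) (idx : Int) (fuel : Nat) : List Int :=
  match fuel with
  | 0 => []
  | Nat.succ fuel' =>
    if idx = -1 then []
    else idx :: strFindallGo c s (PySem.Chars.findFrom s c (idx + 1) none) fuel'

def strFindall (c : List Char) (s : List Char) : List Int :=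
  strFindallGo c s (PySem.Chars.find s c) (s.length + 1)

def iterPairInOrder (xs ys : List Int) : List (Int × Int) :=
  xs.flatMap (fun x => (ys.filter (fun y => x < y)).map (fun y => (x, y)))

def is_possible_board (name : String) (board : String) : Bool :=
  match PySem.List.pyGet? name.toList 0, PySem.List.pyGet? name.toList 1 with
  | some ch1, some ch2 =>
    let c1Indices := strFindall [ch1] board.toList
    let c2Indices := strFindall [ch2] board.toList
    (iterPairInOrder c1Indices c2Indices).any (fun p =>
      let gap := p.2 - p.1
      -- gap = c2 - c1 > 0 for every generated pair, so the slice step is never 0 and slice? is `some`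
      PySem.Chars.startswith ((PySem.Chars.slice? board.toList (some p.1) none gap).getD []) name.toList)
  | _, _ => false  -- name[0] / name[1] raised IndexError: excluded by Pre_

-- ===== PORT B =====
-- for gap in range(1, len(board)): for r in range(gap): if name in board[r::gap]: return True
def is_possible_board_alt (name : String) (board : String) : Bool :=
  (PySem.List.pyRange 1 (board.toList.length : Int)).any (fun gap =>
    (PySem.List.pyRange 0 gap).any (fun r =>
      -- gap ≥ 1, so the slice step is never 0 and slice? is `some`
      PySem.Chars.isIn name.toList ((PySem.Chars.slice? board.toList (some r) none gap).getD [])))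

-- ===== PRECONDITION & SPEC =====
-- Pre_ excludes exactly the inputs where A raises: name[1] (or name[0]) is an IndexError for len(name) < 2.
def Pre_is_possible_board (name : String) (board : String) : Prop := 2 ≤ name.toList.length
instance (name : String) (board : String) : Decidable (Pre_is_possible_board name board) := by unfold Pre_is_possible_board; infer_instance
def pvWitness_is_possible_board : String × String := ("ab", "axb")

def Spec_is_possible_board (name : String) (board : String) (out : Bool) : Prop := out = is_possible_board_alt name board
instance (name : String) (board : String) (out : Bool) : Decidable (Spec_is_possible_board name board out) := by unfold Spec_is_possible_board; infer_instance

-- ===== CLAIM (what is proved, stated in full; the proofs are below) =====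
def Claim_equal_is_possible_board : Prop := ∀ (name : String) (board : String), Dom_is_possible_board name board → Pre_is_possible_board name board → Spec_is_possible_board name board (is_possible_board name board)

-- ===== LEMMAS AND PROOFS =====

-- both programs return true iff some start c1 and later position c2 carry name's first two
-- characters and the arithmetic-progression slice starting at c1 with step c2 - c1 begins with name
def BothHit (nl bl : List Char) (ch1 ch2 : Char) : Prop :=
  ∃ c1 c2 : Nat, c1 < c2 ∧ c2 < bl.length ∧ bl[c1]? = some ch1 ∧ bl[c2]? = some ch2 ∧
    PySem.Chars.startswith ((PySem.Chars.slice? bl (some (c1:Int)) none ((c2:Int) - (c1:Int))).getD []) nl = true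

theorem singleton_prefix_drop (c : Char) (s : List Char) (i : Nat) :
    ([c] <+: s.drop i) ↔ s[i]? = some c := by
  constructor
  · rintro ⟨u, hu⟩
    have h0 : (s.drop i)[0]? = some c := by rw [← hu]; rfl
    simpa [List.getElem?_drop] using h0
  · intro h
    have h0 : (s.drop i)[0]? = some c := by simpa [List.getElem?_drop] using h
    cases hd : s.drop i with
    | nil => rw [hd] at h0; simp at h0
    | cons a u => rw [hd] at h0; simp at h0; exact ⟨u, by simp [h0]⟩

theorem strFindallGo_mem (c : Char) (s : List Char) (k fuel : Nat)
    (hk : k ≤ s.length) (hfuel : s.length + 1 - k ≤ fuel) (x : Int) :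
    (x ∈ strFindallGo [c] s (PySem.Chars.findFrom s [c] (k:Int) none) fuel
      ↔ ∃ i : Nat, k ≤ i ∧ i < s.length ∧ s[i]? = some c ∧ x = (i:Int)) := by
  induction fuel generalizing k with
  | zero => omega
  | succ f ih =>
    by_cases hneg : PySem.Chars.findFrom s [c] (k:Int) none = -1
    · have hno := (PySem.Chars.findFrom_natCast_eq_neg_one_iff s [c] k hk).mp hneg
      rw [List.singleton_infix_iff] at hno
      simp only [strFindallGo, hneg, if_pos, List.not_mem_nil, false_iff]
      rintro ⟨i, hki, hilen, hic, rfl⟩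
      exact hno (by
        have : (s.drop k)[i - k]? = some c := by
          rw [List.getElem?_drop]; rwa [Nat.add_sub_cancel' hki]
        exact List.mem_of_getElem? this)
    · obtain ⟨hle, hpre, hmin⟩ := PySem.Chars.findFrom_natCast_spec s [c] k hk hneg
      set j := PySem.Chars.findFrom s [c] (k:Int) none with hj
      have hj0 : 0 ≤ j := le_trans (by exact_mod_cast Nat.zero_le k) hle
      have hjc : s[j.toNat]? = some c := (singleton_prefix_drop c s j.toNat).mp hpre
      have hjlen : j.toNat < s.length := by
        by_contra hge
        rw [List.getElem?_eq_none_iff.mpr (by omega)] at hjc; simp at hjc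
      have hkj : k ≤ j.toNat := by omega
      have hcast : j + 1 = ((j.toNat + 1 : Nat) : Int) := by omega
      have hrec := ih (j.toNat + 1) (by omega) (by omega)
      rw [show strFindallGo [c] s j (f + 1)
            = j :: strFindallGo [c] s (PySem.Chars.findFrom s [c] (j + 1) none) f by
          simp [strFindallGo, hneg]]
      rw [hcast] at *
      rw [List.mem_cons, hrec]
      constructor
      · rintro (rfl | ⟨i, hki, hilen, hic, rfl⟩)
        · exact ⟨j.toNat, hkj, hjlen, hjc, (Int.toNat_of_nonneg hj0).symm⟩
        · exact ⟨i, by omega, hilen, hic, rfl⟩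
      · rintro ⟨i, hki, hilen, hic, rfl⟩
        rcases Nat.lt_or_ge i (j.toNat + 1) with hlt | hge
        · rcases Nat.eq_or_lt_of_le (Nat.lt_succ_iff.mp hlt) with heq | hlt'
          · left; rw [heq]; exact Int.toNat_of_nonneg hj0
          · exact absurd ((singleton_prefix_drop c s i).mpr hic) (hmin i hki hlt')
        · right; exact ⟨i, hge, hilen, hic, rfl⟩

theorem strFindall_mem (c : Char) (s : List Char) (x : Int) :
    (x ∈ strFindall [c] s ↔ ∃ i : Nat, i < s.length ∧ s[i]? = some c ∧ x = (i:Int)) := by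
  have h := strFindallGo_mem c s 0 (s.length + 1) (Nat.zero_le _) (by omega) x
  rw [show ((0:Nat):Int) = 0 from rfl, PySem.Chars.findFrom_zero] at h
  unfold strFindall
  rw [h]
  simp

theorem mem_iterPairInOrder (xs ys : List Int) (p : Int × Int) :
    (p ∈ iterPairInOrder xs ys ↔ ∃ x ∈ xs, ∃ y ∈ ys, x < y ∧ p = (x, y)) := by
  simp [iterPairInOrder, List.mem_flatMap, List.mem_map, List.mem_filter]
  constructor
  · rintro ⟨x, hx, y, ⟨hy, hlt⟩, rfl⟩; exact ⟨x, hx, y, hy, hlt, rfl⟩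
  · rintro ⟨x, hx, y, hy, hlt, rfl⟩; exact ⟨x, hx, y, ⟨hy, hlt⟩, rfl⟩

theorem portA_iff (nl bl : List Char) (ch1 ch2 : Char) :
    ((iterPairInOrder (strFindall [ch1] bl) (strFindall [ch2] bl)).any (fun p =>
      PySem.Chars.startswith ((PySem.Chars.slice? bl (some p.1) none (p.2 - p.1)).getD []) nl) = true
      ↔ BothHit nl bl ch1 ch2) := by
  rw [List.any_eq_true]
  constructor
  · rintro ⟨p, hp, hchk⟩
    obtain ⟨x, hx, y, hy, hlt, rfl⟩ := (mem_iterPairInOrder _ _ p).mp hp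
    obtain ⟨i, hilen, hic, rfl⟩ := (strFindall_mem ch1 bl x).mp hx
    obtain ⟨i2, hi2len, hi2c, rfl⟩ := (strFindall_mem ch2 bl y).mp hy
    exact ⟨i, i2, by exact_mod_cast hlt, hi2len, hic, hi2c, hchk⟩
  · rintro ⟨c1, c2, hlt, hc2, hc1c, hc2c, hsw⟩
    refine ⟨((c1:Int), (c2:Int)), ?_, hsw⟩
    exact (mem_iterPairInOrder _ _ _).mpr
      ⟨(c1:Int), (strFindall_mem ch1 bl _).mpr ⟨c1, by omega, hc1c, rfl⟩,
       (c2:Int), (strFindall_mem ch2 bl _).mpr ⟨c2, hc2, hc2c, rfl⟩,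
       by exact_mod_cast hlt, rfl⟩

-- the arithmetic-progression subsequence of bl starting at r with stride gm + 1,
-- written as its own structural recursion (character at r, then jump gm + 1 ahead)
def stepCh (bl : List Char) (gm : Nat) (r : Nat) : List Char :=
  if h : r < bl.length then bl[r] :: stepCh bl gm (r + gm + 1) else []
termination_by bl.length - r
decreasing_by omega

theorem stepCh_nil (bl : List Char) (gm r : Nat) (h : bl.length ≤ r) : stepCh bl gm r = [] := by
  rw [stepCh]; simp [Nat.not_lt.mpr h]

theorem slice?_pos_norm (bl : List Char) (gm r : Nat) :
    (PySem.List.slice? bl (some (r:Int)) none ((gm+1:Nat):Int)).getD [] =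
    List.filterMap (fun k => bl[min r bl.length + (gm+1) * k]?)
      (List.range ((bl.length - min r bl.length + gm) / (gm+1))) := by
  have h1 : ¬(((gm+1:Nat):Int) = 0) := by omega
  have h2 : ¬(((gm+1:Nat):Int) < 0) := by omega
  have h3 : (0:Int) < ((gm+1:Nat):Int) := by omega
  have h4 : ¬((r:Int) < 0) := by omega
  simp only [PySem.List.slice?, PySem.List.sliceIndices, if_neg h1, if_neg h2, if_pos h3,
    if_neg h4, Option.getD_some]
  have hmin : min (r:Int) (bl.length:Int) = ((min r bl.length : Nat) : Int) := by
    exact_mod_cast (Nat.cast_min r bl.length).symm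
  rw [hmin]
  set m := min r bl.length with hm
  have hmle : m ≤ bl.length := min_le_right _ _
  have hfun : ∀ k : Nat, ((m:Int) + ((gm+1:Nat):Int) * (k:Int)).toNat = m + (gm+1)*k := by
    intro k
    have : ((m:Int) + ((gm+1:Nat):Int) * (k:Int)) = ((m + (gm+1)*k : Nat) : Int) := by push_cast; ring
    rw [this, Int.toNat_natCast]
  by_cases hlt : m < bl.length
  · rw [if_pos (show (m:Int) < (bl.length:Int) by exact_mod_cast hlt)]
    have hnum : ((bl.length:Int) - (m:Int) + ((gm+1:Nat):Int) - 1) = ((bl.length - m + gm : Nat) : Int) := by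
      push_cast [hmle]; omega
    rw [hnum, ← Int.natCast_div, Int.toNat_natCast]
    simp only [hfun]
  · rw [if_neg (show ¬((m:Int) < (bl.length:Int)) by exact_mod_cast hlt)]
    have hmeq : m = bl.length := by omega
    rw [show (bl.length - m + gm) / (gm+1) = 0 by rw [hmeq, Nat.sub_self, Nat.zero_add]; exact Nat.div_eq_of_lt (by omega)]
    simp

theorem filterMap_stepCh (bl : List Char) (gm : Nat) :
    ∀ f r : Nat, bl.length - r ≤ f →
      List.filterMap (fun k => bl[r + (gm+1) * k]?)
        (List.range ((bl.length - r + gm) / (gm+1))) = stepCh bl gm r := by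
  intro f
  induction f with
  | zero =>
    intro r hf
    have hr : bl.length ≤ r := by omega
    rw [Nat.sub_eq_zero_of_le hr, Nat.zero_add, Nat.div_eq_of_lt (by omega), stepCh_nil bl gm r hr]
    rfl
  | succ f ih =>
    intro r hf
    by_cases hr : r < bl.length
    · have hcnt : (bl.length - r + gm) / (gm+1) = (bl.length - (r+gm+1) + gm) / (gm+1) + 1 := by
        by_cases hb : r + gm + 1 ≤ bl.length
        · have h1 : bl.length - r + gm = (bl.length - (r+gm+1) + gm) + (gm+1) := by omega
          rw [h1, Nat.add_div_right _ (by omega)]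
        · have h2 : bl.length - (r+gm+1) = 0 := by omega
          rw [h2, Nat.zero_add, Nat.div_eq_of_lt (show gm < gm + 1 by omega), Nat.zero_add]
          exact Nat.div_eq_of_lt_le (by omega) (by omega)
      rw [hcnt, List.range_succ_eq_map, List.filterMap_cons]
      have hf0 : bl[r + (gm+1) * 0]? = some (bl[r]'hr) := by
        simp [List.getElem?_eq_getElem hr]
      rw [hf0, List.filterMap_map]
      have hfun : ((fun k => bl[r + (gm+1) * k]?) ∘ Nat.succ)
          = (fun k => bl[(r+gm+1) + (gm+1) * k]?) := by
        funext k
        show bl[r + (gm+1) * (k+1)]? = bl[(r+gm+1) + (gm+1) * k]?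
        congr 1
        ring
      rw [hfun]
      rw [stepCh, dif_pos hr]
      rw [ih (r+gm+1) (by omega)]
    · have hr' : bl.length ≤ r := by omega
      rw [Nat.sub_eq_zero_of_le hr', Nat.zero_add, Nat.div_eq_of_lt (by omega), stepCh_nil bl gm r hr']
      rfl

theorem slice?_getD_eq_stepCh (bl : List Char) (gm r : Nat) (hr : r ≤ bl.length) :
    (PySem.List.slice? bl (some (r:Int)) none ((gm+1:Nat):Int)).getD [] = stepCh bl gm r := by
  rw [slice?_pos_norm, min_eq_left hr]
  exact filterMap_stepCh bl gm (bl.length - r) r le_rfl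

theorem stepCh_drop (bl : List Char) (gm : Nat) :
    ∀ j r : Nat, (stepCh bl gm r).drop j = stepCh bl gm (r + (gm+1) * j) := by
  intro j
  induction j with
  | zero => intro r; simp
  | succ j ih =>
    intro r
    rw [stepCh]
    by_cases hr : r < bl.length
    · rw [dif_pos hr, List.drop_succ_cons, ih (r+gm+1)]
      congr 1
      ring
    · rw [dif_neg hr, List.drop_nil, stepCh_nil bl gm _ (by omega)]

theorem prefix_stepCh_head (bl : List Char) (gm r : Nat) (ch : Char) (l : List Char)
    (h : (ch :: l) <+: stepCh bl gm r) :
    r < bl.length ∧ bl[r]? = some ch ∧ l <+: stepCh bl gm (r + gm + 1) := by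
  rw [stepCh] at h
  by_cases hr : r < bl.length
  · rw [dif_pos hr, List.cons_prefix_cons] at h
    exact ⟨hr, by rw [List.getElem?_eq_getElem hr, h.1], h.2⟩
  · rw [dif_neg hr] at h
    simp at h

theorem portB_iff (nl bl : List Char) (ch1 ch2 : Char) (tl : List Char) (hnl : nl = ch1 :: ch2 :: tl) :
    ((PySem.List.pyRange 1 (bl.length : Int)).any (fun gap =>
      (PySem.List.pyRange 0 gap).any (fun r =>
        PySem.Chars.isIn nl ((PySem.Chars.slice? bl (some r) none gap).getD []))) = true
      ↔ BothHit nl bl ch1 ch2) := by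
  simp only [List.any_eq_true, PySem.Chars.slice?_eq_listSlice?]
  constructor
  · rintro ⟨gap, hgap, r, hr, hin⟩
    rw [PySem.List.mem_pyRange_one] at hgap hr
    obtain ⟨gm, rfl⟩ : ∃ gm : Nat, gap = ((gm+1:Nat):Int) := ⟨(gap - 1).toNat, by omega⟩
    obtain ⟨rn, rfl⟩ : ∃ rn : Nat, r = ((rn:Nat):Int) := ⟨r.toNat, by omega⟩
    have hgn : gm + 1 < bl.length := by exact_mod_cast hgap.2
    have hrg : rn < gm + 1 := by exact_mod_cast hr.2
    rw [slice?_getD_eq_stepCh bl gm rn (by omega)] at hin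
    obtain ⟨j, hpre⟩ := (PySem.Chars.exists_prefix_drop_iff_isIn nl _).mpr hin
    rw [stepCh_drop] at hpre
    subst hnl
    obtain ⟨hc1lt, hch1, hpre2⟩ := prefix_stepCh_head bl gm _ ch1 (ch2 :: tl) hpre
    obtain ⟨hc2lt, hch2, -⟩ := prefix_stepCh_head bl gm _ ch2 tl hpre2
    refine ⟨rn + (gm+1)*j, rn + (gm+1)*j + gm + 1, by omega, hc2lt, hch1, hch2, ?_⟩
    rw [PySem.Chars.slice?_eq_listSlice?, PySem.Chars.startswith_iff]
    have hstep : ((rn + (gm+1)*j + gm + 1 : Nat):Int) - ((rn + (gm+1)*j : Nat):Int)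
        = ((gm+1:Nat):Int) := by push_cast; ring
    rw [hstep, slice?_getD_eq_stepCh bl gm _ (by omega)]
    exact hpre
  · rintro ⟨c1, c2, hlt, hc2n, hch1, hch2, hsw⟩
    obtain ⟨gm, hgm⟩ : ∃ gm : Nat, c2 - c1 = gm + 1 := ⟨c2 - c1 - 1, by omega⟩
    rw [PySem.Chars.slice?_eq_listSlice?, PySem.Chars.startswith_iff] at hsw
    have hstep : ((c2:Nat):Int) - ((c1:Nat):Int) = ((gm+1:Nat):Int) := by push_cast; omega
    rw [hstep, slice?_getD_eq_stepCh bl gm c1 (by omega)] at hsw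
    refine ⟨((gm+1:Nat):Int), PySem.List.mem_pyRange_one.mpr ⟨by omega, by exact_mod_cast (by omega : gm + 1 < bl.length)⟩,
      ((c1 % (gm+1) : Nat):Int), PySem.List.mem_pyRange_one.mpr ⟨by omega, by exact_mod_cast Nat.mod_lt c1 (by omega)⟩, ?_⟩
    apply (PySem.Chars.exists_prefix_drop_iff_isIn nl _).mp
    refine ⟨c1 / (gm+1), ?_⟩
    rw [slice?_getD_eq_stepCh bl gm (c1 % (gm+1)) (le_trans (Nat.mod_le _ _) (by omega)),
      stepCh_drop, Nat.mod_add_div c1 (gm+1)]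
    exact hsw

-- ===== VERDICT (by name: the statement is the Claim_ definition above) =====
theorem is_possible_board_spec : Claim_equal_is_possible_board := by
  intro name board _ hpre
  unfold Spec_is_possible_board
  unfold Pre_is_possible_board at hpre
  obtain ⟨ch1, ch2, tl, hname⟩ : ∃ a b t, name.toList = a :: b :: t := by
    cases h : name.toList with
    | nil => rw [h] at hpre; simp at hpre
    | cons a u => cases hu : u with
      | nil => rw [h, hu] at hpre; simp at hpre
      | cons b t => subst hu; exact ⟨a, b, t, rfl⟩
  unfold is_possible_board is_possible_board_alt
  rw [hname]
  rw [show PySem.List.pyGet? (ch1 :: ch2 :: tl) 0 = some ch1 by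
        rw [show (0:Int)=((0:Nat):Int) by norm_num, PySem.List.pyGet?_natCast]; rfl,
      show PySem.List.pyGet? (ch1 :: ch2 :: tl) 1 = some ch2 by
        rw [show (1:Int)=((1:Nat):Int) by norm_num, PySem.List.pyGet?_natCast]; rfl]
  rw [Bool.eq_iff_iff]
  exact (portA_iff (ch1 :: ch2 :: tl) board.toList ch1 ch2).trans
    (portB_iff (ch1 :: ch2 :: tl) board.toList ch1 ch2 tl rfl).symm
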